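-- pv_equiv track=rewrite | github.com/Zuhye/PythonAlgorithm | 프로그래머스/Lv3_숫자게임.py | solution
-- ===== SOURCE A (Python) =====
-- from collections import deque
--
-- def solution(A, B):
--     answer = -1
--
--     A.sort(reverse=True)
--     B.sort(reverse=True)
--
--     q = deque(B)
--
--     for i in range(len(A)):
--         if A[i] < q[0]:
--             q.popleft()
--             answer += 1
--         else:
--             q.pop()  # 최소값 제거
--
--     return answer + 1
-- ===== SOURCE B (Python) =====
-- def solution(A, B):
--     # In-place descending sorts kept (A mutates its arguments the same way).
--     A.sort(reverse=True)
--     B.sort(reverse=True)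
--     count = 0
--     j = 0
--     for a in A:
--         if j < len(B) and B[j] > a:
--             count += 1
--             j += 1
--     return count
-- ===== Notes on version B (the rewrite author's own statement) =====
-- stated objective: idiomatic
-- what changed: Replaces the two-ended deque (popleft on win, pop-from-right on loss) by a single forward index into sorted B plus a win counter, never consuming an element on a loss and with no -1/+1 answer bookkeeping.
import Mathlib
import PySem

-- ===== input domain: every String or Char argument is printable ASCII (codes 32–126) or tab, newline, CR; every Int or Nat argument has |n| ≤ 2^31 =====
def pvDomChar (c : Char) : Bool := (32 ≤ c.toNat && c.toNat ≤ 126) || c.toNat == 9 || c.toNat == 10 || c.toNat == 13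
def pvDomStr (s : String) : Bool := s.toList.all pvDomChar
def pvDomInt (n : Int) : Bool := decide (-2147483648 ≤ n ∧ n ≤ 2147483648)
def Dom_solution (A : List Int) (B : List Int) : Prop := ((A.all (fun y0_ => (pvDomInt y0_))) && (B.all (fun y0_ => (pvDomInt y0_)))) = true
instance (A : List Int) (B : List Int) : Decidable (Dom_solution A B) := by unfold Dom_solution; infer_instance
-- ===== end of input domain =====

-- B replaces A's two-ended deque consumption by a single forward index into sorted B plus a win
-- counter (idiomatic; equivalence is about the RETURN value; both Pythons sort their arguments in place).


-- ===== PORT A =====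
-- the for-loop over A with the deque q: q[0] on an empty deque is Python's IndexError
-- (reachable only when len(A) > len(B)); that branch returns the accumulator and is excluded by Pre_.
def pvSolLoop : List Int → List Int → Int → Int
  | [], _, ans => ans
  | _ :: _, [], ans => ans          -- Python raises IndexError here; outside Pre_solution
  | a :: rest, h :: t, ans =>
      if a < h then pvSolLoop rest t (ans + 1)            -- q.popleft(); answer += 1
      else pvSolLoop rest ((h :: t).dropLast) ans         -- q.pop()

def solution (A : List Int) (B : List Int) : Int :=
  let As := PySem.List.sorted A (fun x => x) true
  let Bs := PySem.List.sorted B (fun x => x) true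
  pvSolLoop As Bs (-1) + 1

-- ===== PORT B =====
-- the for-loop over A: forward index j into Bs, win counter
def pvAltLoop (Bs : List Int) : List Int → Nat → Int → Int
  | [], _, c => c
  | a :: rest, j, c =>
      if j < Bs.length ∧ Bs.getD j 0 > a then pvAltLoop Bs rest (j + 1) (c + 1)
      else pvAltLoop Bs rest j c

def solution_alt (A : List Int) (B : List Int) : Int :=
  let As := PySem.List.sorted A (fun x => x) true
  let Bs := PySem.List.sorted B (fun x => x) true
  pvAltLoop Bs As 0 0

-- ===== PRECONDITION & SPEC =====
-- Pre_ excludes exactly the inputs where A raises IndexError (deque exhausted): len(A) > len(B).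
def Pre_solution (A : List Int) (B : List Int) : Prop := A.length ≤ B.length
instance (A : List Int) (B : List Int) : Decidable (Pre_solution A B) := by unfold Pre_solution; infer_instance
def pvWitness_solution : List Int × List Int := ([3, 1], [2, 4, 0])

def Spec_solution (A : List Int) (B : List Int) (out : Int) : Prop := out = solution_alt A B
instance (A : List Int) (B : List Int) (out : Int) : Decidable (Spec_solution A B out) := by unfold Spec_solution; infer_instance

-- ===== CLAIM (what is proved, stated in full; the proofs are below) =====
def Claim_equal_solution : Prop := ∀ (A : List Int) (B : List Int), Dom_solution A B → Pre_solution A B → Spec_solution A B (solution A B)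

-- ===== LEMMAS AND PROOFS =====

-- the alt accumulator is additive
lemma pvAltLoop_shift (Bs : List Int) : ∀ (As : List Int) (j : Nat) (c : Int),
    pvAltLoop Bs As j c = pvAltLoop Bs As j 0 + c := by
  intro As
  induction As with
  | nil => intro j c; simp [pvAltLoop]
  | cons a rest ih =>
      intro j c
      by_cases h : j < Bs.length ∧ Bs.getD j 0 > a
      · simp only [pvAltLoop, if_pos h]
        rw [ih (j + 1) (c + 1), ih (j + 1) (0 + 1)]
        ring
      · simp only [pvAltLoop, if_neg h]
        exact ih j c

lemma take_succ_dropLast (l : List Int) (m : Nat) (h : m + 1 ≤ l.length) :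
    (l.take (m + 1)).dropLast = l.take m := by
  rw [List.dropLast_eq_take, List.take_take, List.length_take]
  congr 1
  omega

-- key invariant: A's deque is the slice of Bs of length m starting at j; both loops agree
lemma pvLoop_eq (Bs : List Int) : ∀ (As : List Int) (j m : Nat) (c : Int),
    As.length ≤ m → j + m ≤ Bs.length →
    pvSolLoop As ((Bs.drop j).take m) c = pvAltLoop Bs As j c := by
  intro As
  induction As with
  | nil => intro j m c _ _; cases ((Bs.drop j).take m) <;> simp [pvSolLoop, pvAltLoop]
  | cons a rest ih =>
      intro j m c hlen hjm
      obtain ⟨m', rfl⟩ : ∃ m', m = m' + 1 := ⟨m - 1, by simp at hlen; omega⟩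
      have hj : j < Bs.length := by omega
      have hdrop : Bs.drop j = Bs[j] :: Bs.drop (j + 1) := List.drop_eq_getElem_cons hj
      have hslice : (Bs.drop j).take (m' + 1) = Bs[j] :: ((Bs.drop (j + 1)).take m') := by
        rw [hdrop]; rfl
      have hget : Bs.getD j 0 = Bs[j] := List.getD_eq_getElem Bs 0 hj
      rw [hslice]
      by_cases hc : a < Bs[j]
      · have hcond : j < Bs.length ∧ Bs.getD j 0 > a := ⟨hj, by rw [hget]; exact hc⟩
        simp only [pvSolLoop, pvAltLoop, if_pos hc, if_pos hcond]
        exact ih (j + 1) m' (c + 1) (by simp at hlen ⊢; omega) (by omega)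
      · have hcond : ¬ (j < Bs.length ∧ Bs.getD j 0 > a) := by
          rw [hget]; exact fun ⟨_, hgt⟩ => hc hgt
        simp only [pvSolLoop, pvAltLoop, if_neg hc, if_neg hcond]
        rw [← hslice, take_succ_dropLast _ _ (by simp [List.length_drop]; omega)]
        exact ih j m' c (by simp at hlen ⊢; omega) (by omega)

-- ===== VERDICT (by name: the statement is the Claim_ definition above) =====
theorem solution_spec : Claim_equal_solution := by
  intro A B _ hpre
  unfold Spec_solution solution solution_alt
  set As := PySem.List.sorted A (fun x => x) true with hAs
  set Bs := PySem.List.sorted B (fun x => x) true with hBs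
  have hlen : As.length ≤ Bs.length := by
    rw [hAs, hBs, PySem.List.length_sorted, PySem.List.length_sorted]
    exact hpre
  have h := pvLoop_eq Bs As 0 Bs.length (-1) hlen (by omega)
  simp only [List.drop_zero, List.take_length] at h
  show pvSolLoop As Bs (-1) + 1 = pvAltLoop Bs As 0 0
  rw [h, pvAltLoop_shift]
  ring
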